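-- pv_equiv track=rewrite | github.com/goodnight000/Tartan2026 | backend/main.py | _history_requested_booking_details
-- ===== SOURCE A (Python) =====
-- def _history_requested_booking_details(history: list[dict[str, str]]) -> bool:
--     booking_prompts = [
--         "which lab/clinic should i book with",
--         "choose one option number or name",
--         "what day and time should i request",
--         "what location or city should i use",
--         "what is the booking page url",
--         "what is your full name",
--         "what email should i use",
--         "what phone number should i use",
--     ]
--     for item in reversed(history):
--         if item.get("role") != "assistant":
--             continue
--         content = item.get("content", "").lower()
--         if any(prompt in content for prompt in booking_prompts):
--             return True
--     return False
-- ===== SOURCE B (Python) =====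
-- def _history_requested_booking_details(history: list[dict[str, str]]) -> bool:
--     booking_prompts = [
--         "which lab/clinic should i book with",
--         "choose one option number or name",
--         "what day and time should i request",
--         "what location or city should i use",
--         "what is the booking page url",
--         "what is your full name",
--         "what email should i use",
--         "what phone number should i use",
--     ]
--     # Join all lowercased assistant messages into ONE newline-separated corpus.
--     # No prompt contains a newline, so a prompt occurs in the corpus iff it
--     # occurs inside a single assistant message; this collapses the per-message
--     # search into 8 substring tests on one haystack.
--     corpus = "\n".join(
--         item.get("content", "").lower()
--         for item in history
--         if item.get("role") == "assistant"
--     )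
--     return any(prompt in corpus for prompt in booking_prompts)
-- ===== Notes on version B (the rewrite author's own statement) =====
-- stated objective: alternative
-- what changed: A scans reversed(history) message by message with an early return and an inner any() over the 8 prompts per assistant message; B instead joins all lowercased assistant messages into one newline-separated corpus and performs exactly 8 substring tests on that single haystack (correct because no prompt contains a newline, so no match can cross a join boundary).
import Mathlib
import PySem

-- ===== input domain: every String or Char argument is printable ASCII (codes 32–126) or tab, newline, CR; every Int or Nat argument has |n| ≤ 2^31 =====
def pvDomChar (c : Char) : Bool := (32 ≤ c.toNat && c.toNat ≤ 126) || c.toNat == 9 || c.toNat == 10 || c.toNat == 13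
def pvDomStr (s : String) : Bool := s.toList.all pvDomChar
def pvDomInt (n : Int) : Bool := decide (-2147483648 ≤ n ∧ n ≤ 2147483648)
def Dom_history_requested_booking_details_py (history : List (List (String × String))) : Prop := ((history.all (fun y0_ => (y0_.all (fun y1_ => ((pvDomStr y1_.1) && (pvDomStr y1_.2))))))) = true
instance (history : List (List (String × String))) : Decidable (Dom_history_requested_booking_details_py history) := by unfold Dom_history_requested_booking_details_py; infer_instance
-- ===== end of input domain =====

-- B replaces A's per-message reversed scan (inner any() over 8 prompts per message) by joining
-- all lowercased assistant messages into ONE newline-separated corpus and doing exactly 8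
-- substring tests on it; correct since no prompt contains a newline (objective: alternative).

-- ===== PORT A =====
def bookingPrompts : List String := [
  "which lab/clinic should i book with",
  "choose one option number or name",
  "what day and time should i request",
  "what location or city should i use",
  "what is the booking page url",
  "what is your full name",
  "what email should i use",
  "what phone number should i use"]

-- A's loop over reversed(history): skip non-assistant items, return True on first match.
def historyLoopA : List (List (String × String)) → Bool
  | [] => false
  | item :: rest =>
    if (PySem.Dict.mk item).get? "role" ≠ some "assistant" then historyLoopA rest
    else
      let content := PySem.Str.lower (((PySem.Dict.mk item).get? "content").getD "")
      if bookingPrompts.any (fun prompt => PySem.Str.isIn prompt content) then true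
      else historyLoopA rest

def history_requested_booking_details_py (history : List (List (String × String))) : Bool :=
  historyLoopA history.reverse

-- ===== PORT B =====
def history_requested_booking_details_py_alt (history : List (List (String × String))) : Bool :=
  let corpus := PySem.Str.join "\n"
    ((history.filter (fun item => (PySem.Dict.mk item).get? "role" == some "assistant")).map
      (fun item => PySem.Str.lower (((PySem.Dict.mk item).get? "content").getD "")))
  bookingPrompts.any (fun prompt => PySem.Str.isIn prompt corpus)

-- ===== PRECONDITION & SPEC =====
def Spec_history_requested_booking_details_py (history : List (List (String × String))) (out : Bool) : Prop := out = history_requested_booking_details_py_alt history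
instance (history : List (List (String × String))) (out : Bool) : Decidable (Spec_history_requested_booking_details_py history out) := by unfold Spec_history_requested_booking_details_py; infer_instance

-- ===== CLAIM (what is proved, stated in full; the proofs are below) =====
def Claim_equal_history_requested_booking_details_py : Prop := ∀ (history : List (List (String × String))), Dom_history_requested_booking_details_py history → Spec_history_requested_booking_details_py history (history_requested_booking_details_py history)

-- ===== LEMMAS AND PROOFS =====

-- A's early-return loop is the existential over the list.
theorem historyLoopA_eq_any (l : List (List (String × String))) :
    historyLoopA l = l.any (fun item =>
      ((PySem.Dict.mk item).get? "role" == some "assistant") &&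
      bookingPrompts.any (fun prompt =>
        PySem.Str.isIn prompt (PySem.Str.lower (((PySem.Dict.mk item).get? "content").getD "")))) := by
  induction l with
  | nil => rfl
  | cons item rest ih =>
    simp only [historyLoopA, List.any_cons]
    by_cases h : (PySem.Dict.mk item).get? "role" = some "assistant"
    · cases hb : bookingPrompts.any (fun prompt =>
          PySem.Str.isIn prompt (PySem.Str.lower (((PySem.Dict.mk item).get? "content").getD ""))) <;>
        simp [h, ih]
    · simp [h, ih]

-- A prefix of a ++ c :: b not containing c is a prefix of a.
theorem prefix_of_append_sep {p a b : List Char} {c : Char}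
    (hc : c ∉ p) (h : p <+: a ++ c :: b) : p <+: a := by
  induction p generalizing a with
  | nil => exact List.nil_prefix
  | cons x p' ih =>
    cases a with
    | nil =>
      rw [List.nil_append, List.cons_prefix_cons] at h
      exact absurd (h.1 ▸ List.mem_cons_self) hc
    | cons y a' =>
      rw [List.cons_append, List.cons_prefix_cons] at h
      exact List.cons_prefix_cons.2 ⟨h.1, ih (fun hm => hc (List.mem_cons_of_mem _ hm)) h.2⟩

-- An infix of a ++ c :: b not containing c lies entirely in a or entirely in b.
theorem infix_append_sep {p b : List Char} {c : Char} (hc : c ∉ p) :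
    ∀ {a : List Char}, p <:+: a ++ c :: b → p <:+: a ∨ p <:+: b := by
  intro a
  induction a with
  | nil =>
    intro h
    rw [List.nil_append, List.infix_cons_iff] at h
    rcases h with h | h
    · cases p with
      | nil => exact Or.inl (List.nil_infix)
      | cons x p' =>
        rw [List.cons_prefix_cons] at h
        exact absurd (h.1 ▸ List.mem_cons_self) hc
    · exact Or.inr h
  | cons y a' ih =>
    intro h
    rw [List.cons_append, List.infix_cons_iff] at h
    rcases h with h | h
    · exact Or.inl (prefix_of_append_sep hc h).isInfix
    · rcases ih h with h' | h'
      · exact Or.inl (List.infix_cons h')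
      · exact Or.inr h'

-- A nonempty pattern without the separator character occurs in the joined list
-- iff it occurs in one of the parts.
theorem infix_join_sep_iff {p : List Char} {c : Char} (hc : c ∉ p) (hne : p ≠ []) :
    ∀ (ts : List (List Char)), p <:+: PySem.Chars.join [c] ts ↔ ∃ t ∈ ts, p <:+: t := by
  intro ts
  induction ts with
  | nil =>
    rw [PySem.Chars.join_nil]
    simp [List.infix_nil, hne]
  | cons t rest ih =>
    cases rest with
    | nil =>
      rw [PySem.Chars.join_singleton]
      simp
    | cons u rest' =>
      rw [PySem.Chars.join_cons_cons]
      have hshape : t ++ [c] ++ PySem.Chars.join [c] (u :: rest')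
          = t ++ c :: PySem.Chars.join [c] (u :: rest') := by simp
      rw [hshape]
      constructor
      · intro h
        rcases infix_append_sep hc h with h' | h'
        · exact ⟨t, List.mem_cons_self, h'⟩
        · obtain ⟨s, hs, hin⟩ := (ih).1 h'
          exact ⟨s, List.mem_cons_of_mem _ hs, hin⟩
      · rintro ⟨s, hs, hin⟩
        rcases List.mem_cons.1 hs with rfl | hs'
        · exact hin.trans ⟨[], c :: PySem.Chars.join [c] (u :: rest'), by simp⟩
        · have : p <:+: PySem.Chars.join [c] (u :: rest') := (ih).2 ⟨s, hs', hin⟩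
          exact this.trans ⟨t ++ [c], [], by simp⟩

-- Every prompt is nonempty and contains no newline.
theorem prompts_ok : ∀ p ∈ bookingPrompts, '\n' ∉ p.toList ∧ p.toList ≠ [] := by decide

-- The corpus test decomposes into a per-message test.
theorem isIn_join_texts {p : String} (hp : p ∈ bookingPrompts) (texts : List String) :
    PySem.Str.isIn p (PySem.Str.join "\n" texts) = true ↔
      ∃ t ∈ texts, PySem.Str.isIn p t = true := by
  obtain ⟨hc, hne⟩ := prompts_ok p hp
  rw [PySem.Str.isIn_iff_infix, PySem.Str.toList_join]
  have hsep : ("\n" : String).toList = ['\n'] := by decide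
  rw [hsep, infix_join_sep_iff hc hne]
  constructor
  · rintro ⟨tl, htl, h⟩
    obtain ⟨s, hs, rfl⟩ := List.mem_map.1 htl
    exact ⟨s, hs, (PySem.Str.isIn_iff_infix _ _).2 h⟩
  · rintro ⟨s, hs, h⟩
    exact ⟨s.toList, List.mem_map_of_mem hs, (PySem.Str.isIn_iff_infix _ _).1 h⟩

-- ===== VERDICT (by name: the statement is the Claim_ definition above) =====
theorem history_requested_booking_details_py_spec : Claim_equal_history_requested_booking_details_py := by
  intro history _
  unfold Spec_history_requested_booking_details_py history_requested_booking_details_py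
    history_requested_booking_details_py_alt
  rw [historyLoopA_eq_any, List.any_reverse, Bool.eq_iff_iff]
  simp only [List.any_eq_true, Bool.and_eq_true, beq_iff_eq]
  constructor
  · rintro ⟨item, hmem, hrole, prompt, hp, hin⟩
    refine ⟨prompt, hp, (isIn_join_texts hp _).2 ?_⟩
    exact ⟨_, List.mem_map_of_mem (List.mem_filter.2 ⟨hmem, by simp [hrole]⟩), hin⟩
  · rintro ⟨prompt, hp, h⟩
    obtain ⟨text, htext, hin⟩ := (isIn_join_texts hp _).1 h
    obtain ⟨item, hitem, rfl⟩ := List.mem_map.1 htext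
    obtain ⟨hmem, hrole⟩ := List.mem_filter.1 hitem
    exact ⟨item, hmem, by simpa using hrole, prompt, hp, hin⟩
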